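-- pv_equiv track=rewrite | github.com/riddheshSajwan/data_structures_algorithm | hashing/countRightTriangles.py | solve
-- ===== SOURCE A (Python) =====
-- def solve(A, B):
--     MOD = int(1e9+7)
--     res = 0
--     n = len(A)
--     mx,my = {},{}
--     for i in range(n):
--         if A[i] not in mx:
--             mx[A[i]] = 0
--         if B[i] not in my:
--             my[B[i]] = 0
--         mx[A[i]] += 1
--         my[B[i]] += 1
--     for i in range(n):
--         res += (mx[A[i]]-1)*(my[B[i]]-1)%MOD
--         res %= MOD
--     return res
-- ===== SOURCE B (Python) =====
-- def solve(A, B):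
--     MOD = 10**9 + 7
--     mx, my, joint = {}, {}, {}
--     for i in range(len(A)):
--         x, y = A[i], B[i]
--         mx[x] = mx.get(x, 0) + 1
--         my[y] = my.get(y, 0) + 1
--         joint[(x, y)] = joint.get((x, y), 0) + 1
--     res = 0
--     for (x, y), c in joint.items():
--         res = (res + c * ((mx[x] - 1) * (my[y] - 1) % MOD)) % MOD
--     return res
-- ===== Notes on version B (the rewrite author's own statement) =====
-- stated objective: alternative
-- what changed: Aggregates the second pass over all n indices into a pass over the distinct (A[i],B[i]) pairs of a joint counter, adding count*(mx[x]-1)*(my[y]-1) per distinct pair instead of one term per index.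
import Mathlib
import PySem

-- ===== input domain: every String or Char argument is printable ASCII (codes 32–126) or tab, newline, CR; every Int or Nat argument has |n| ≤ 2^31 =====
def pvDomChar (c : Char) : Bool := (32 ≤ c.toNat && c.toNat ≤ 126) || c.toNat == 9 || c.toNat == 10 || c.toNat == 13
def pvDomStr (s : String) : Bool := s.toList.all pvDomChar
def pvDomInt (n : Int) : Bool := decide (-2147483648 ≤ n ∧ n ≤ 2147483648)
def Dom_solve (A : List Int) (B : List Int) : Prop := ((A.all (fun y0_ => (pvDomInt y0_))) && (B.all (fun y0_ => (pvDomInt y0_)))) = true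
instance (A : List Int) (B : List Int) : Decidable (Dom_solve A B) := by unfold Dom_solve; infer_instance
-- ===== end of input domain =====

-- B replaces A's per-index second pass by a pass over the distinct (A[i],B[i]) pairs of a joint counter (alternative decomposition).

-- ===== PORT A =====
def solve (A : List Int) (B : List Int) : Int :=
  let MOD : Int := 1000000007
  let n : Int := (A.length : Int)
  let st := (PySem.List.pyRange 0 n 1).foldl
    (fun (d : PySem.Dict Int Int × PySem.Dict Int Int) i =>
      let a := PySem.List.pyGetD A i 0
      let b := PySem.List.pyGetD B i 0
      let mx := if d.1.contains a then d.1 else d.1.insert a 0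
      let my := if d.2.contains b then d.2 else d.2.insert b 0
      (mx.modify a 0 (· + 1), my.modify b 0 (· + 1)))
    (PySem.Dict.empty, PySem.Dict.empty)
  (PySem.List.pyRange 0 n 1).foldl
    (fun res i =>
      let a := PySem.List.pyGetD A i 0
      let b := PySem.List.pyGetD B i 0
      PySem.Int.mod (res + PySem.Int.mod ((st.1.getD a 0 - 1) * (st.2.getD b 0 - 1)) MOD) MOD)
    0

-- ===== PORT B =====
def solve_alt (A : List Int) (B : List Int) : Int :=
  let MOD : Int := 1000000007
  let st := (PySem.List.pyRange 0 (A.length : Int) 1).foldl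
    (fun (d : PySem.Dict Int Int × PySem.Dict Int Int × PySem.Dict (Int × Int) Int) i =>
      let x := PySem.List.pyGetD A i 0
      let y := PySem.List.pyGetD B i 0
      (d.1.insert x (d.1.getD x 0 + 1),
       d.2.1.insert y (d.2.1.getD y 0 + 1),
       d.2.2.insert (x, y) (d.2.2.getD (x, y) 0 + 1)))
    (PySem.Dict.empty, PySem.Dict.empty, PySem.Dict.empty)
  st.2.2.items.foldl
    (fun res kv =>
      PySem.Int.mod (res + kv.2 * PySem.Int.mod ((st.1.getD kv.1.1 0 - 1) * (st.2.1.getD kv.1.2 0 - 1)) MOD) MOD)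
    0

-- ===== PRECONDITION & SPEC =====
-- Pre_ excludes inputs with len(B) < len(A), on which both A and B raise IndexError at B[i].
def Pre_solve (A : List Int) (B : List Int) : Prop := A.length ≤ B.length
instance (A : List Int) (B : List Int) : Decidable (Pre_solve A B) := by unfold Pre_solve; infer_instance
def pvWitness_solve : List Int × List Int := ([1, 2, 1], [5, 5, 7])
def Spec_solve (A : List Int) (B : List Int) (out : Int) : Prop := out = solve_alt A B
instance (A : List Int) (B : List Int) (out : Int) : Decidable (Spec_solve A B out) := by unfold Spec_solve; infer_instance

-- ===== CLAIM (what is proved, stated in full; the proofs are below) =====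
def Claim_equal_solve : Prop := ∀ (A : List Int) (B : List Int), Dom_solve A B → Pre_solve A B → Spec_solve A B (solve A B)

-- ===== LEMMAS AND PROOFS =====

-- step function of A's counting loop equals the plain Counter step
theorem pvStepA_eq {α : Type} [BEq α] [LawfulBEq α] (d : PySem.Dict α Int) (x : α) :
    (if d.contains x then d else d.insert x 0).modify x 0 (· + 1) = d.modify x 0 (· + 1) := by
  by_cases h : d.contains x = true
  · simp [h]
  · simp only [Bool.not_eq_true] at h
    simp [h, PySem.Dict.modify, PySem.Dict.getD_insert_self, PySem.Dict.insert_insert_self,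
      PySem.Dict.getD_of_not_contains _ _ h]

-- A's contains/insert-0/increment loop builds Counter(xs)
theorem pvCounterA_eq {α : Type} [BEq α] [LawfulBEq α] (xs : List α) :
    xs.foldl (fun d x => (if d.contains x then d else d.insert x 0).modify x 0 (· + 1))
      PySem.Dict.empty = PySem.Dict.counter xs := by
  rw [PySem.Dict.counter_eq_foldl]
  congr 1
  funext d x
  exact pvStepA_eq d x

-- the ((res + t) % M) accumulation computes the sum modulo M
theorem pvModFold (M : Int) (hM : 0 < M) (ts : List Int) :
    ∀ r : Int, ts.foldl (fun r t => PySem.Int.mod (r + t) M) (PySem.Int.mod r M)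
      = PySem.Int.mod (r + ts.sum) M := by
  induction ts with
  | nil => intro r; simp
  | cons t ts ih =>
    intro r
    have h1 : PySem.Int.mod (PySem.Int.mod r M + t) M = PySem.Int.mod (r + t) M := by
      rw [PySem.Int.mod_eq_emod_of_pos hM, PySem.Int.mod_eq_emod_of_pos hM,
        PySem.Int.mod_eq_emod_of_pos hM, Int.emod_add_emod]
    calc (t :: ts).foldl (fun r t => PySem.Int.mod (r + t) M) (PySem.Int.mod r M)
        = ts.foldl (fun r t => PySem.Int.mod (r + t) M) (PySem.Int.mod (r + t) M) := by
          simp [List.foldl_cons, h1]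
      _ = PySem.Int.mod ((r + t) + ts.sum) M := ih (r + t)
      _ = PySem.Int.mod (r + (t :: ts).sum) M := by rw [List.sum_cons]; ring_nf

theorem pvModFoldMap {α : Type} (M : Int) (hM : 0 < M) (l : List α) (h : α → Int) :
    l.foldl (fun r x => PySem.Int.mod (r + h x) M) 0 = PySem.Int.mod ((l.map h).sum) M := by
  have h0 : (0 : Int) = PySem.Int.mod 0 M := by
    rw [PySem.Int.mod_eq_emod_of_pos hM]; simp
  rw [h0, ← List.foldl_map (f := h) (g := fun r t => PySem.Int.mod (r + t) M),
    pvModFold M hM _ 0, zero_add]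

-- A-counting loop over indices i reading C[i] builds Counter of the read values
theorem pvLoopA (C : List Int) (l : List Int) :
    l.foldl (fun (d : PySem.Dict Int Int) i =>
        (if d.contains (PySem.List.pyGetD C i 0) then d
         else d.insert (PySem.List.pyGetD C i 0) 0).modify (PySem.List.pyGetD C i 0) 0 (· + 1))
      PySem.Dict.empty
    = PySem.Dict.counter (l.map fun i => PySem.List.pyGetD C i 0) := by
  rw [← pvCounterA_eq]
  exact (List.foldl_map (f := fun i => PySem.List.pyGetD C i 0)
    (g := fun (d : PySem.Dict Int Int) x =>
      (if d.contains x then d else d.insert x 0).modify x 0 (· + 1))).symm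

-- B-counting loop (insert/getD+1) over indices reading C[i]
theorem pvLoopB (C : List Int) (l : List Int) :
    l.foldl (fun (d : PySem.Dict Int Int) i =>
        d.insert (PySem.List.pyGetD C i 0) (d.getD (PySem.List.pyGetD C i 0) 0 + 1))
      PySem.Dict.empty
    = PySem.Dict.counter (l.map fun i => PySem.List.pyGetD C i 0) := by
  rw [← PySem.Dict.foldl_insert_getD_add_one_eq_counter]
  exact (List.foldl_map (f := fun i => PySem.List.pyGetD C i 0)
    (g := fun (d : PySem.Dict Int Int) x => d.insert x (d.getD x 0 + 1))).symm

-- B's joint-counting loop over the (A[i],B[i]) pairs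
theorem pvLoopJ (A B : List Int) (l : List Int) :
    l.foldl (fun (d : PySem.Dict (Int × Int) Int) i =>
        d.insert (PySem.List.pyGetD A i 0, PySem.List.pyGetD B i 0)
          (d.getD (PySem.List.pyGetD A i 0, PySem.List.pyGetD B i 0) 0 + 1))
      PySem.Dict.empty
    = PySem.Dict.counter (l.map fun i => (PySem.List.pyGetD A i 0, PySem.List.pyGetD B i 0)) := by
  rw [← PySem.Dict.foldl_insert_getD_add_one_eq_counter]
  exact (List.foldl_map (f := fun i => (PySem.List.pyGetD A i 0, PySem.List.pyGetD B i 0))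
    (g := fun (d : PySem.Dict (Int × Int) Int) x => d.insert x (d.getD x 0 + 1))).symm

-- List.count is instance-independent for lawful BEq instances
theorem pvCountCongr {α : Type} [DecidableEq α] [b1 : BEq α] [LawfulBEq α]
    (l : List α) (m : α) : @List.count α b1 m l = @List.count α instBEqOfDecidableEq m l := by
  induction l with
  | nil => rfl
  | cons x t ih =>
    rw [@List.count_cons α b1, @List.count_cons α instBEqOfDecidableEq, ih]
    have : (x == m) = (@instBEqOfDecidableEq α _).beq x m := by
      rcases Decidable.eq_or_ne x m with h | h <;> simp_all [BEq.beq]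
    rw [this]

-- group a sum over the list by its distinct values, weighted by multiplicity
theorem pvWeightedSum {α : Type} [BEq α] [LawfulBEq α] [DecidableEq α]
    (l : List α) (f : α → Int) :
    (l.map f).sum = ((PySem.Set.ofList l).map (fun k => (l.count k : Int) * f k)).sum := by
  rw [Finset.sum_list_map_count,
    ← List.sum_toFinset (fun k => (l.count k : Int) * f k) (PySem.Set.nodup_ofList l)]
  have hfs : (PySem.Set.ofList l).toFinset = l.toFinset := by
    apply Finset.ext; intro x; simp [List.mem_toFinset, PySem.Set.mem_ofList]
  rw [hfs]
  refine Finset.sum_congr rfl (fun m _ => ?_)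
  simp only [nsmul_eq_mul]
  rw [pvCountCongr l m]

theorem solve_spec : Claim_equal_solve := by
  intro A B _ _
  unfold Spec_solve solve solve_alt
  simp only []
  have hst := PySem.List.foldl_prod_mk
    (fun (d : PySem.Dict Int Int) (i : Int) =>
      (if d.contains (PySem.List.pyGetD A i 0) then d
       else d.insert (PySem.List.pyGetD A i 0) 0).modify (PySem.List.pyGetD A i 0) 0 (· + 1))
    (fun (d : PySem.Dict Int Int) (i : Int) =>
      (if d.contains (PySem.List.pyGetD B i 0) then d
       else d.insert (PySem.List.pyGetD B i 0) 0).modify (PySem.List.pyGetD B i 0) 0 (· + 1))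
    (PySem.List.pyRange 0 (A.length : Int) 1) PySem.Dict.empty PySem.Dict.empty
  beta_reduce at hst
  rw [hst]
  have hst2 := PySem.List.foldl_prod_mk
    (fun (d : PySem.Dict Int Int) (i : Int) =>
      d.insert (PySem.List.pyGetD A i 0) (d.getD (PySem.List.pyGetD A i 0) 0 + 1))
    (fun (d : PySem.Dict Int Int × PySem.Dict (Int × Int) Int) (i : Int) =>
      (d.1.insert (PySem.List.pyGetD B i 0) (d.1.getD (PySem.List.pyGetD B i 0) 0 + 1),
       d.2.insert (PySem.List.pyGetD A i 0, PySem.List.pyGetD B i 0)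
         (d.2.getD (PySem.List.pyGetD A i 0, PySem.List.pyGetD B i 0) 0 + 1)))
    (PySem.List.pyRange 0 (A.length : Int) 1) PySem.Dict.empty
    (PySem.Dict.empty, PySem.Dict.empty)
  beta_reduce at hst2
  rw [hst2]
  have hst3 := PySem.List.foldl_prod_mk
    (fun (d : PySem.Dict Int Int) (i : Int) =>
      d.insert (PySem.List.pyGetD B i 0) (d.getD (PySem.List.pyGetD B i 0) 0 + 1))
    (fun (d : PySem.Dict (Int × Int) Int) (i : Int) =>
      d.insert (PySem.List.pyGetD A i 0, PySem.List.pyGetD B i 0)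
        (d.getD (PySem.List.pyGetD A i 0, PySem.List.pyGetD B i 0) 0 + 1))
    (PySem.List.pyRange 0 (A.length : Int) 1) PySem.Dict.empty PySem.Dict.empty
  beta_reduce at hst3
  rw [hst3]
  rw [pvLoopA A, pvLoopA B, pvLoopB A, pvLoopB B, pvLoopJ A B]
  simp only [PySem.Dict.getD_counter, PySem.Dict.items_counter]
  have hL := pvModFoldMap 1000000007 (by norm_num) (PySem.List.pyRange 0 (A.length : Int) 1)
    (fun i => PySem.Int.mod
      ((↑(List.count (PySem.List.pyGetD A i 0)
            (List.map (fun i => PySem.List.pyGetD A i 0) (PySem.List.pyRange 0 (A.length : Int) 1))) - 1) *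
       (↑(List.count (PySem.List.pyGetD B i 0)
            (List.map (fun i => PySem.List.pyGetD B i 0) (PySem.List.pyRange 0 (A.length : Int) 1))) - 1))
      1000000007)
  beta_reduce at hL
  rw [hL]
  have hR1 := List.foldl_map
    (f := fun k : Int × Int => (k,
      (↑(List.count k (List.map (fun i => (PySem.List.pyGetD A i 0, PySem.List.pyGetD B i 0))
          (PySem.List.pyRange 0 (A.length : Int) 1))) : Int)))
    (g := fun (res : Int) (kv : (Int × Int) × Int) =>
      PySem.Int.mod (res + kv.2 * PySem.Int.mod
        ((↑(List.count kv.1.1 (List.map (fun i => PySem.List.pyGetD A i 0) (PySem.List.pyRange 0 (A.length : Int) 1))) - 1) *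
         (↑(List.count kv.1.2 (List.map (fun i => PySem.List.pyGetD B i 0) (PySem.List.pyRange 0 (A.length : Int) 1))) - 1))
        1000000007) 1000000007)
    (l := PySem.Set.ofList (List.map (fun i => (PySem.List.pyGetD A i 0, PySem.List.pyGetD B i 0))
          (PySem.List.pyRange 0 (A.length : Int) 1)))
    (init := (0 : Int))
  beta_reduce at hR1
  rw [hR1]
  have hR2 := pvModFoldMap 1000000007 (by norm_num)
    (PySem.Set.ofList (List.map (fun i => (PySem.List.pyGetD A i 0, PySem.List.pyGetD B i 0))
          (PySem.List.pyRange 0 (A.length : Int) 1)))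
    (fun k : Int × Int =>
      (↑(List.count k (List.map (fun i => (PySem.List.pyGetD A i 0, PySem.List.pyGetD B i 0))
          (PySem.List.pyRange 0 (A.length : Int) 1))) : Int) * PySem.Int.mod
        ((↑(List.count k.1 (List.map (fun i => PySem.List.pyGetD A i 0) (PySem.List.pyRange 0 (A.length : Int) 1))) - 1) *
         (↑(List.count k.2 (List.map (fun i => PySem.List.pyGetD B i 0) (PySem.List.pyRange 0 (A.length : Int) 1))) - 1))
        1000000007)
  beta_reduce at hR2
  rw [hR2]
  apply congrArg (fun s => PySem.Int.mod s 1000000007)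
  have hmm : List.map
      (fun i => PySem.Int.mod
        ((↑(List.count (PySem.List.pyGetD A i 0)
              (List.map (fun i => PySem.List.pyGetD A i 0) (PySem.List.pyRange 0 (A.length : Int) 1))) - 1) *
         (↑(List.count (PySem.List.pyGetD B i 0)
              (List.map (fun i => PySem.List.pyGetD B i 0) (PySem.List.pyRange 0 (A.length : Int) 1))) - 1))
        1000000007)
      (PySem.List.pyRange 0 (A.length : Int) 1)
    = List.map
      (fun p : Int × Int => PySem.Int.mod
        ((↑(List.count p.1 (List.map (fun i => PySem.List.pyGetD A i 0) (PySem.List.pyRange 0 (A.length : Int) 1))) - 1) *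
         (↑(List.count p.2 (List.map (fun i => PySem.List.pyGetD B i 0) (PySem.List.pyRange 0 (A.length : Int) 1))) - 1))
        1000000007)
      (List.map (fun i => (PySem.List.pyGetD A i 0, PySem.List.pyGetD B i 0)) (PySem.List.pyRange 0 (A.length : Int) 1)) := by
    rw [List.map_map]
    rfl
  rw [hmm, pvWeightedSum]
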